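-- pv_equiv track=rewrite | github.com/olgaObnosova/EGE | №25/186_Поляков.py | f
-- ===== SOURCE A (Python) =====
-- def f(n):
--     s = set()
--     c = 1
--     m = 0
--     for i in range(2, int(n**0.5)+1):
--         if n % i == 0:
--             s.add(i)
--             s.add(n//i)
--     if len(s) >= 5:
--         for x in list(s):
--             c *= x
--         return c
--     else:
--         return 0
-- ===== SOURCE B (Python) =====
-- def f(n):
--     # product of the proper divisors (1 and n excluded) if there are at least five, else zero,
--     # via the divisor-product identity: no set, no product accumulation.
--     r = int(n ** 0.5)
--     cnt = 0
--     for i in range(2, r + 1):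
--         if n % i == 0:
--             cnt += 1 if i * i == n else 2
--     if cnt < 5:
--         return 0
--     return r ** cnt if r * r == n else n ** (cnt // 2)
-- ===== Notes on version B (the rewrite author's own statement) =====
-- stated objective: simpler
-- what changed: B replaces A's divisor set and explicit product accumulation by a single counting pass over the same sqrt(n) range plus the closed-form divisor-product identity: the product of the proper divisors is n^(cnt//2) (or isqrt(n)^cnt for a perfect square).
import Mathlib
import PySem

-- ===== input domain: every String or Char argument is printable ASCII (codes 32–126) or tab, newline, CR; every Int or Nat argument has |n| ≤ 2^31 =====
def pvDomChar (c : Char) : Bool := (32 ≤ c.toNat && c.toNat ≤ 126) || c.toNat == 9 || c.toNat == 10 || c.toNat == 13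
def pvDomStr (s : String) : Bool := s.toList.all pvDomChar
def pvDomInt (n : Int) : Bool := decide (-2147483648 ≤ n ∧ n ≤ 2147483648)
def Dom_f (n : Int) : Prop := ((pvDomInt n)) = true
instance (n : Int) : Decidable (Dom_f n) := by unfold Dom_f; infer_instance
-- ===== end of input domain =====

-- B drops A's divisor set and product loop: it counts divisor pairs in the same sqrt(n)
-- range and returns the product in closed form via the divisor-product identity (simpler).


-- ===== PORT A =====
-- loop body of A: if n % i == 0: s.add(i); s.add(n//i)
def stepA (n : Int) (s : PySem.Set Int) (i : Int) : PySem.Set Int :=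
  if PySem.Int.mod n i = 0 then PySem.Set.add (PySem.Set.add s i) (PySem.Int.floordiv n i) else s

-- int(n**0.5) is ported as Nat.sqrt n.toNat: exact on Pre_f (0 ≤ n ≤ 2^31, where the
-- double-precision square root has the same integer part).  The final product loop
-- 'for x in list(s): c *= x' iterates the set in hash order; the product does not
-- depend on that order, so it is ported as a fold over the set in insertion order.
def f (n : Int) : Int :=
  let s : PySem.Set Int :=
    (PySem.List.pyRange 2 ((Nat.sqrt n.toNat : Int) + 1) 1).foldl (stepA n) PySem.Set.empty
  if 5 ≤ s.length then s.foldl (· * ·) 1 else 0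

-- ===== PORT B =====
-- loop body of B: if n % i == 0: cnt += 1 if i*i == n else 2
def stepB (n : Int) (c : Int) (i : Int) : Int :=
  if PySem.Int.mod n i = 0 then c + (if i * i = n then 1 else 2) else c

def f_alt (n : Int) : Int :=
  let r : Int := (Nat.sqrt n.toNat : Int)
  let cnt : Int := (PySem.List.pyRange 2 (r + 1) 1).foldl (stepB n) 0
  if cnt < 5 then 0
  else if r * r = n then r ^ cnt.toNat
  else n ^ (PySem.Int.floordiv cnt 2).toNat

-- ===== PRECONDITION & SPEC =====
-- Pre_f excludes exactly the negative inputs, where A raises TypeError (int() of a complex square root).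
def Pre_f (n : Int) : Prop := 0 ≤ n
instance (n : Int) : Decidable (Pre_f n) := by unfold Pre_f; infer_instance
def pvWitness_f : Int := (48)

def Spec_f (n : Int) (out : Int) : Prop := out = f_alt n
instance (n : Int) (out : Int) : Decidable (Spec_f n out) := by unfold Spec_f; infer_instance

-- ===== CLAIM (what is proved, stated in full; the proofs are below) =====
def Claim_equal_f : Prop := ∀ (n : Int), Dom_f n → Pre_f n → Spec_f n (f n)

-- ===== LEMMAS AND PROOFS =====

-- Loop invariant after processing i = 2..k (1 ≤ k ≤ r, r = isqrt n):
-- the count equals the set's size; every element is a member of a divisor pair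
-- (a, n/a) with 2 ≤ a ≤ k; and the set's product is the stated closed form.
def Good (n r k : Int) (s : List Int) (c : Int) : Prop :=
  c = (s.length : Int) ∧
  (∀ x ∈ s, ∃ a b : Int, 2 ≤ a ∧ a ≤ k ∧ a * b = n ∧ (x = a ∨ x = b)) ∧
  ((∃ t : Nat, c = 2 * t ∧ s.foldl (· * ·) 1 = n ^ t ∧ ¬(r * r = n ∧ 2 ≤ r ∧ r ≤ k)) ∨
   (r * r = n ∧ 2 ≤ r ∧ r ≤ k ∧ ∃ t : Nat, c = 2 * t + 1 ∧ s.foldl (· * ·) 1 = n ^ t * r))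

theorem good_step (n r k : Int) (s : List Int) (c : Int)
    (hr : r * r ≤ n) (h1 : 1 ≤ k) (hk : k + 1 ≤ r)
    (hg : Good n r k s c) :
    Good n r (k + 1) (stepA n s (k + 1)) (stepB n c (k + 1)) := by
  obtain ⟨hc, hmem, hOr⟩ := hg
  unfold stepA stepB
  by_cases hdvd : PySem.Int.mod n (k + 1) = 0
  · simp only [if_pos hdvd]
    obtain ⟨q, hq⟩ : (k + 1) ∣ n := (PySem.Int.mod_eq_zero_iff_dvd n (k + 1)).mp hdvd
    have hkpos : (0 : Int) < k + 1 := by omega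
    have hfd : PySem.Int.floordiv n (k + 1) = q := by
      rw [PySem.Int.floordiv_eq_ediv_of_pos hkpos, hq, Int.mul_ediv_cancel_left _ (by omega)]
    have hn_ge : (k + 1) * (k + 1) ≤ n := by
      have := mul_le_mul hk hk (by omega : (0:Int) ≤ k + 1) (by omega : (0:Int) ≤ r)
      linarith
    have hiq : k + 1 ≤ q := by
      by_contra h
      have h2 : (k + 1) * q ≤ (k + 1) * k :=
        mul_le_mul_of_nonneg_left (by omega) (by omega)
      nlinarith
    have hi_notin : (k + 1) ∉ s := by
      intro hx
      obtain ⟨a, b, ha2, hak, hab, hx⟩ := hmem _ hx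
      rcases hx with hx | hx
      · omega
      · have hlt : a * (k + 1) < (k + 1) * (k + 1) :=
          mul_lt_mul_of_pos_right (by omega) hkpos
        rw [← hx] at hab
        linarith
    have hq_notin : q ∉ s := by
      intro hx
      obtain ⟨a, b, ha2, hak, hab, hx⟩ := hmem _ hx
      rcases hx with hx | hx
      · omega
      · rw [← hx] at hab
        have h0 : a * q = (k + 1) * q := by linarith
        have : a = k + 1 := mul_right_cancel₀ (by omega) h0
        omega
    rw [hfd, PySem.Set.add_of_not_mem hi_notin]
    by_cases hsq : (k + 1) * (k + 1) = n
    · simp only [if_pos hsq]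
      have hqi : q = k + 1 :=
        mul_left_cancel₀ (show (k + 1 : Int) ≠ 0 by omega) (by rw [← hq]; exact hsq.symm)
      have hrk : r = k + 1 := by
        by_contra h
        have h2 : k + 2 ≤ r := by omega
        have : (k + 2) * (k + 2) ≤ r * r := mul_le_mul h2 h2 (by omega) (by omega)
        nlinarith
      rw [hqi, PySem.Set.add_of_mem (by simp)]
      refine ⟨by simp [hc], ?_, ?_⟩
      · intro x hx
        rcases List.mem_append.mp hx with hx | hx
        · obtain ⟨a, b, ha2, hak, hab, hx⟩ := hmem _ hx
          exact ⟨a, b, ha2, by omega, hab, hx⟩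
        · simp at hx
          exact ⟨k + 1, k + 1, by omega, le_refl _, hsq, Or.inl hx⟩
      · rcases hOr with ⟨t, hct, hp, _⟩ | ⟨_, _, hrle, _⟩
        · refine Or.inr ⟨by rw [hrk]; exact hsq, by omega, by omega, t, by omega, ?_⟩
          simp only [List.foldl_append, List.foldl_cons, List.foldl_nil]
          rw [hp, hrk]
        · omega
    · simp only [if_neg hsq]
      have hqne : q ≠ k + 1 := fun h => hsq (by rw [hq, h])
      rw [PySem.Set.add_of_not_mem (by simp [hq_notin, hqne])]
      refine ⟨by simp [hc], ?_, ?_⟩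
      · intro x hx
        rcases List.mem_append.mp hx with hx | hx
        · rcases List.mem_append.mp hx with hx | hx
          · obtain ⟨a, b, ha2, hak, hab, hx⟩ := hmem _ hx
            exact ⟨a, b, ha2, by omega, hab, hx⟩
          · simp at hx
            exact ⟨k + 1, q, by omega, le_refl _, hq.symm, Or.inl hx⟩
        · simp at hx
          exact ⟨k + 1, q, by omega, le_refl _, hq.symm, Or.inr hx⟩
      · rcases hOr with ⟨t, hct, hp, hcl⟩ | ⟨_, _, hrle, _⟩
        · refine Or.inl ⟨t + 1, by omega, ?_, ?_⟩
          · simp only [List.foldl_append, List.foldl_cons, List.foldl_nil, hp]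
            linear_combination (-(n : Int) ^ t) * hq
          · rintro ⟨hrr, hr2, hrle⟩
            have hre : r = k + 1 := by omega
            exact hsq (by rw [← hre]; exact hrr)
        · omega
  · simp only [if_neg hdvd]
    refine ⟨hc, ?_, ?_⟩
    · intro x hx
      obtain ⟨a, b, ha2, hak, hab, hx⟩ := hmem _ hx
      exact ⟨a, b, ha2, by omega, hab, hx⟩
    · rcases hOr with ⟨t, hct, hp, hcl⟩ | ⟨hrr, hr2, hrle, ht⟩
      · refine Or.inl ⟨t, hct, hp, ?_⟩
        rintro ⟨hrr, hr2, hrle⟩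
        rcases (by omega : r ≤ k ∨ r = k + 1) with h | h
        · exact hcl ⟨hrr, hr2, h⟩
        · exact hdvd ((PySem.Int.mod_eq_zero_iff_dvd n (k + 1)).mpr ⟨k + 1, by rw [← h, ← hrr]⟩)
      · exact Or.inr ⟨hrr, hr2, by omega, ht⟩

theorem good_range (n r : Int) (hr : r * r ≤ n) (h2 : 1 ≤ r) :
    ∀ k : Int, 1 ≤ k → k ≤ r →
      Good n r k ((PySem.List.pyRange 2 (k + 1) 1).foldl (stepA n) PySem.Set.empty)
        ((PySem.List.pyRange 2 (k + 1) 1).foldl (stepB n) 0) := by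
  intro k hk1
  refine Int.le_induction ?_ ?_ k hk1
  · intro _
    rw [PySem.List.pyRange_one_eq_nil (by omega)]
    exact ⟨by simp, by simp, Or.inl ⟨0, by simp, by simp, by rintro ⟨_, h, h'⟩; omega⟩⟩
  · intro k hk ih hkr
    rw [PySem.List.pyRange_one_succ_right (by omega : (2 : Int) ≤ k + 1),
      List.foldl_append, List.foldl_append]
    simp only [List.foldl_cons, List.foldl_nil]
    exact good_step n r k _ _ hr hk (by omega) (ih (by omega))

-- ===== VERDICT (by name: the statement is the Claim_ definition above) =====
theorem f_spec : Claim_equal_f := by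
  intro n _ hpre
  unfold Spec_f
  simp only [f, f_alt]
  set R := Nat.sqrt n.toNat with hR
  have hn : ((n.toNat : Int)) = n := Int.toNat_of_nonneg hpre
  have hr2 : (R : Int) * R ≤ n := by
    rw [← hn]; exact_mod_cast Nat.sqrt_le n.toNat
  by_cases hle : R ≤ 1
  · rw [PySem.List.pyRange_one_eq_nil (by omega)]
    simp [PySem.Set.empty]
  · obtain ⟨hc, hmem, hOr⟩ :=
      good_range n (R : Int) hr2 (by omega) (R : Int) (by omega) le_rfl
    by_cases hc5 :
        (PySem.List.pyRange 2 ((R : Int) + 1) 1).foldl (stepB n) 0 < 5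
    · rw [if_pos hc5, if_neg (show ¬ 5 ≤ ((PySem.List.pyRange 2 ((R : Int) + 1) 1).foldl
        (stepA n) PySem.Set.empty).length by omega)]
    · rw [if_neg hc5, if_pos (show 5 ≤ ((PySem.List.pyRange 2 ((R : Int) + 1) 1).foldl
        (stepA n) PySem.Set.empty).length by omega)]
      rcases hOr with ⟨t, hct, hp, hcl⟩ | ⟨hrr, _, _, t, hct, hp⟩
      · rw [if_neg (show ¬ ((R : Int) * R = n) from fun h => hcl ⟨h, by omega, le_rfl⟩), hp]
        have hfd2 : PySem.Int.floordiv
            ((PySem.List.pyRange 2 ((R : Int) + 1) 1).foldl (stepB n) 0) 2 = (t : Int) := by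
          rw [PySem.Int.floordiv_eq_ediv_of_pos (by omega)]; omega
        rw [hfd2]
        simp
      · rw [if_pos hrr, hp,
          (show ((PySem.List.pyRange 2 ((R : Int) + 1) 1).foldl (stepB n) 0).toNat
            = 2 * t + 1 by omega),
          pow_succ, pow_mul, sq, hrr]
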